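-- pv_equiv track=rewrite | github.com/moonbit-community/moonpython | Lib/re.py | _subn_whitespace_only_lines
-- ===== SOURCE A (Python) =====
-- def _subn_whitespace_only_lines(repl, string, count=0):
--     if repl != "" and not isinstance(repl, str):
--         raise NotImplementedError("regex engine not available")
--     out = []
--     i = 0
--     n = 0
--     while i <= len(string):
--         line_end = string.find("\n", i)
--         if line_end == -1:
--             line_end = len(string)
--             has_newline = False
--         else:
--             has_newline = True
--         line = string[i:line_end]
--         if line and all(ch in " \t" for ch in line) and (count == 0 or n < count):
--             out.append(repl)
--             n += 1
--         else:
--             out.append(line)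
--         if not has_newline:
--             break
--         out.append("\n")
--         i = line_end + 1
--     return "".join(out), n
-- ===== SOURCE B (Python) =====
-- def _subn_whitespace_only_lines(repl, string, count=0):
--     if repl != "" and not isinstance(repl, str):
--         raise NotImplementedError("regex engine not available")
--     out = []
--     buf = []
--     ws = True   # every char of the current (partial) line so far is ' ' or '\t'
--     n = 0
--     for ch in string:
--         if ch == "\n":
--             if buf and ws and (count == 0 or n < count):
--                 out.append(repl)
--                 n += 1
--             else:
--                 out.extend(buf)
--             out.append("\n")
--             buf = []
--             ws = True
--         else:
--             buf.append(ch)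
--             ws = ws and (ch == " " or ch == "\t")
--     if buf and ws and (count == 0 or n < count):
--         out.append(repl)
--         n += 1
--     else:
--         out.extend(buf)
--     return "".join(out), n
-- ===== Notes on version B (the rewrite author's own statement) =====
-- stated objective: alternative
-- what changed: Replaces A's per-line extraction loop (repeated find('\n') plus slicing) by a single character-stream automaton that maintains a current-line buffer and an all-whitespace flag, flushing either repl or the buffer at each newline and at end of input.
import Mathlib
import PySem

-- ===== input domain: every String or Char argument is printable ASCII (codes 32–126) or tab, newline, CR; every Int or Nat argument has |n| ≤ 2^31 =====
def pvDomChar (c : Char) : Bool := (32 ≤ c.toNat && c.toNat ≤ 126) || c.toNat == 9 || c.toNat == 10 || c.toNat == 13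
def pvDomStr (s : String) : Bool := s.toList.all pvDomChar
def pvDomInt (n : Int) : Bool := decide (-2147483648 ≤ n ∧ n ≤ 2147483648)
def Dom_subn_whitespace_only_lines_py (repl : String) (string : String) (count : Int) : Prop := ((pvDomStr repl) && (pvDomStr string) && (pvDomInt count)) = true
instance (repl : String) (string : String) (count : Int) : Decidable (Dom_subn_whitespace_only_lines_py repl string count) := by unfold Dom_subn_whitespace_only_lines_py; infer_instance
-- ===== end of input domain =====

-- B replaces A's per-line find("\n")/slice extraction loop by a single character-stream
-- automaton (buffer + whitespace flag, flushing at each newline) — alternative algorithm,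
-- same O(n) cost (no speed claim).

-- ===== PORT A =====
-- A's while-loop: i is the current position, out the list of emitted chunks, n the
-- replacement counter; the isinstance guard of the Python is vacuous for a String repl.
def loopA (repl : List Char) (s : List Char) (count : Int) (i : Nat)
    (out : List (List Char)) (n : Int) : List (List Char) × Int :=
  if h : i ≤ s.length then
    if hnl : PySem.Chars.findFrom s ['\n'] (i : Int) = -1 then
      -- line_end = len(string); has_newline = False: emit the last chunk and break
      let line := PySem.List.slice s (some (i : Int)) (some (s.length : Int))
      if line ≠ [] ∧ (∀ c ∈ line, c = ' ' ∨ c = '\t') ∧ (count = 0 ∨ n < count) then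
        (out ++ [repl], n + 1)
      else
        (out ++ [line], n)
    else
      let j := PySem.Chars.findFrom s ['\n'] (i : Int)
      let line := PySem.List.slice s (some (i : Int)) (some j)
      let p := if line ≠ [] ∧ (∀ c ∈ line, c = ' ' ∨ c = '\t') ∧ (count = 0 ∨ n < count) then
          (out ++ [repl], n + 1)
        else
          (out ++ [line], n)
      loopA repl s count (j.toNat + 1) (p.1 ++ [['\n']]) p.2
  else (out, n)
termination_by s.length + 1 - i
decreasing_by
  have := (PySem.Chars.findFrom_natCast_spec s ['\n'] i h hnl).1
  omega

def subn_whitespace_only_lines_py (repl : String) (string : String) (count : Int) : String × Int :=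
  let r := loopA repl.toList string.toList count 0 [] 0
  (String.ofList (PySem.Chars.join [] r.1), r.2)   -- "".join(out)

-- ===== PORT B =====
-- B's per-character step: state = (out chunks, current-line buffer, whitespace flag, counter)
def stepB (repl : List Char) (count : Int)
    (st : List (List Char) × List Char × Bool × Int) (ch : Char) :
    List (List Char) × List Char × Bool × Int :=
  match st with
  | (out, buf, ws, n) =>
    if ch = '\n' then
      if buf ≠ [] ∧ ws = true ∧ (count = 0 ∨ n < count) then
        (out ++ [repl] ++ [['\n']], [], true, n + 1)
      else
        (out ++ [buf] ++ [['\n']], [], true, n)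
    else
      (out, buf ++ [ch], ws && (ch == ' ' || ch == '\t'), n)

def subn_whitespace_only_lines_py_alt (repl : String) (string : String) (count : Int) : String × Int :=
  match string.toList.foldl (stepB repl.toList count) ([], [], true, 0) with
  | (out, buf, ws, n) =>
    -- final flush of the last (newline-less) line
    if buf ≠ [] ∧ ws = true ∧ (count = 0 ∨ n < count) then
      (String.ofList (PySem.Chars.join [] (out ++ [repl.toList])), n + 1)
    else
      (String.ofList (PySem.Chars.join [] (out ++ [buf])), n)

-- ===== PRECONDITION & SPEC =====
def Spec_subn_whitespace_only_lines_py (repl : String) (string : String) (count : Int) (out : String × Int) : Prop := out = subn_whitespace_only_lines_py_alt repl string count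
instance (repl : String) (string : String) (count : Int) (out : String × Int) : Decidable (Spec_subn_whitespace_only_lines_py repl string count out) := by unfold Spec_subn_whitespace_only_lines_py; infer_instance

-- ===== CLAIM (what is proved, stated in full; the proofs are below) =====
def Claim_equal_subn_whitespace_only_lines_py : Prop := ∀ (repl : String) (string : String) (count : Int), Dom_subn_whitespace_only_lines_py repl string count → Spec_subn_whitespace_only_lines_py repl string count (subn_whitespace_only_lines_py repl string count)

-- ===== LEMMAS AND PROOFS =====

-- the per-line decision both programs implement, on an explicit line list
def pvCore (repl : List Char) (count : Int) : Int → List (List Char) → List (List Char) × Int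
  | n, [] => ([], n)
  | n, l :: ls =>
    if l ≠ [] ∧ (∀ c ∈ l, c = ' ' ∨ c = '\t') ∧ (count = 0 ∨ n < count) then
      let r := pvCore repl count (n + 1) ls
      (repl :: r.1, r.2)
    else
      let r := pvCore repl count n ls
      (l :: r.1, r.2)

-- A's chunk list: lines interleaved with "\n" chunks
def pvChunks : List (List Char) → List (List Char)
  | [] => []
  | [l] => [l]
  | l :: l' :: ls => l :: ['\n'] :: pvChunks (l' :: ls)

theorem pvChunks_cons (x : List Char) (ls : List (List Char)) (h : ls ≠ []) :
    pvChunks (x :: ls) = x :: ['\n'] :: pvChunks ls := by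
  cases ls with
  | nil => exact absurd rfl h
  | cons y ys => rfl

theorem pvCore_length (repl : List Char) (count : Int) (n : Int) (ls : List (List Char)) :
    (pvCore repl count n ls).1.length = ls.length := by
  induction ls generalizing n with
  | nil => rfl
  | cons l ls ih => simp only [pvCore]; split <;> simp [ih]

theorem splitOn_eq_splitOnP (cs : List Char) :
    cs.splitOn '\n' = List.splitOnP (· == '\n') cs := rfl

theorem splitOn_ne_nil (cs : List Char) : cs.splitOn '\n' ≠ [] := by
  rw [splitOn_eq_splitOnP]; exact List.splitOnP_ne_nil _ cs

theorem splitOn_no_newline (cs : List Char) (h : '\n' ∉ cs) : cs.splitOn '\n' = [cs] := by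
  induction cs with
  | nil => rfl
  | cons c cs ih =>
    rw [splitOn_eq_splitOnP, List.splitOnP_cons]
    have hc : (c == '\n') = false := by
      simp only [beq_eq_false_iff_ne]; intro he; exact h (he ▸ List.mem_cons_self)
    rw [hc]
    simp only [Bool.false_eq_true, if_false]
    rw [← splitOn_eq_splitOnP, ih (fun hm => h (List.mem_cons_of_mem _ hm))]
    rfl

theorem splitOn_pre (pre rest : List Char) (h : '\n' ∉ pre) :
    (pre ++ '\n' :: rest).splitOn '\n' = pre :: rest.splitOn '\n' := by
  induction pre with
  | nil =>
    rw [splitOn_eq_splitOnP, List.nil_append, List.splitOnP_cons]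
    simp [splitOn_eq_splitOnP]
  | cons c cs ih =>
    have hc : (c == '\n') = false := by
      simp only [beq_eq_false_iff_ne]; intro he; exact h (he ▸ List.mem_cons_self)
    rw [splitOn_eq_splitOnP, List.cons_append, List.splitOnP_cons, hc]
    simp only [Bool.false_eq_true, if_false]
    rw [← splitOn_eq_splitOnP, ih (fun hm => h (List.mem_cons_of_mem _ hm))]
    rfl

-- A's loop computes pvCore on the split of the remaining suffix, chunked with "\n"s
theorem loopA_eq (repl : List Char) (count : Int) (s : List Char) (i : Nat)
    (out : List (List Char)) (n : Int) (h : i ≤ s.length) :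
    loopA repl s count i out n =
      (out ++ pvChunks (pvCore repl count n ((s.drop i).splitOn '\n')).1,
       (pvCore repl count n ((s.drop i).splitOn '\n')).2) := by
  rw [loopA, dif_pos h]
  by_cases hnl : PySem.Chars.findFrom s ['\n'] (i : Int) = -1
  · rw [dif_pos hnl]
    have hnm : '\n' ∉ s.drop i := by
      have := (PySem.Chars.findFrom_natCast_eq_neg_one_iff s ['\n'] i h).1 hnl
      intro hm
      obtain ⟨l1, l2, hl⟩ := List.append_of_mem hm
      exact this ⟨l1, l2, by rw [hl]; simp⟩
    have hline : PySem.List.slice s (some (i : Int)) (some (s.length : Int)) = s.drop i := by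
      rw [PySem.List.slice_natCast]
      exact List.take_of_length_le (by simp)
    rw [splitOn_no_newline _ hnm, hline]
    simp only [pvCore]
    split <;> rfl
  · rw [dif_neg hnl]
    obtain ⟨hij, hpre, hmin⟩ := PySem.Chars.findFrom_natCast_spec s ['\n'] i h hnl
    set j := PySem.Chars.findFrom s ['\n'] (i : Int) with hj
    have hij' : i ≤ j.toNat := by omega
    have hjlt : j.toNat < s.length := by
      have h1 := hpre.length_le
      simp only [List.length_drop, List.length_cons, List.length_nil] at h1
      omega
    have hdropj : s.drop j.toNat = '\n' :: s.drop (j.toNat + 1) := by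
      obtain ⟨t, ht⟩ := hpre
      have h1 : s.drop (j.toNat + 1) = t := by
        rw [← List.tail_drop, ← ht]; rfl
      rw [← ht, h1]; rfl
    have hline : PySem.List.slice s (some (i : Int)) (some j) = (s.drop i).take (j.toNat - i) := by
      rw [PySem.List.slice_toNat s (by positivity) (by omega)]
      simp
    have hnm : '\n' ∉ (s.drop i).take (j.toNat - i) := by
      intro hm
      obtain ⟨m, hmlt, hme⟩ := List.mem_iff_getElem.mp hm
      have hmlen : m < j.toNat - i := lt_of_lt_of_le hmlt (by simp [List.length_take])
      have hient : i + m < s.length := by omega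
      have hse : s[i + m] = '\n' := by
        rw [← hme]; simp [List.getElem_take, List.getElem_drop]
      exact hmin (i + m) (by omega) (by omega)
        (by rw [List.drop_eq_getElem_cons hient, hse]; exact ⟨_, rfl⟩)
    have hdecomp : s.drop i = (s.drop i).take (j.toNat - i) ++ '\n' :: s.drop (j.toNat + 1) := by
      conv_lhs => rw [← List.take_append_drop (j.toNat - i) (s.drop i)]
      rw [List.drop_drop, show i + (j.toNat - i) = j.toNat by omega, hdropj]
    have hsplit : (s.drop i).splitOn '\n'
        = (s.drop i).take (j.toNat - i) :: (s.drop (j.toNat + 1)).splitOn '\n' := by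
      conv_lhs => rw [hdecomp]
      exact splitOn_pre _ _ hnm
    show loopA repl s count (j.toNat + 1)
        ((if PySem.List.slice s (some (i : Int)) (some j) ≠ [] ∧
              (∀ c ∈ PySem.List.slice s (some (i : Int)) (some j), c = ' ' ∨ c = '\t') ∧
              (count = 0 ∨ n < count) then
            (out ++ [repl], n + 1)
          else (out ++ [PySem.List.slice s (some (i : Int)) (some j)], n)).1 ++ [['\n']])
        ((if PySem.List.slice s (some (i : Int)) (some j) ≠ [] ∧
              (∀ c ∈ PySem.List.slice s (some (i : Int)) (some j), c = ' ' ∨ c = '\t') ∧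
              (count = 0 ∨ n < count) then
            (out ++ [repl], n + 1)
          else (out ++ [PySem.List.slice s (some (i : Int)) (some j)], n)).2)
      = (out ++ pvChunks (pvCore repl count n ((s.drop i).splitOn '\n')).1,
         (pvCore repl count n ((s.drop i).splitOn '\n')).2)
    rw [hline, hsplit]
    have hrec : ∀ out' n', loopA repl s count (j.toNat + 1) out' n' =
        (out' ++ pvChunks (pvCore repl count n' ((s.drop (j.toNat + 1)).splitOn '\n')).1,
         (pvCore repl count n' ((s.drop (j.toNat + 1)).splitOn '\n')).2) :=
      fun out' n' => loopA_eq repl count s (j.toNat + 1) out' n' (by omega)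
    simp only [pvCore]
    by_cases hc : (s.drop i).take (j.toNat - i) ≠ [] ∧
        (∀ c ∈ (s.drop i).take (j.toNat - i), c = ' ' ∨ c = '\t') ∧ (count = 0 ∨ n < count)
    · rw [if_pos hc, if_pos hc]
      rw [hrec]
      have hne : (pvCore repl count (n + 1) ((s.drop (j.toNat + 1)).splitOn '\n')).1 ≠ [] := by
        intro he
        have := pvCore_length repl count (n + 1) ((s.drop (j.toNat + 1)).splitOn '\n')
        rw [he] at this
        exact splitOn_ne_nil _ (List.length_eq_zero_iff.mp this.symm)
      rw [pvChunks_cons _ _ hne]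
      simp
    · rw [if_neg hc, if_neg hc]
      rw [hrec]
      have hne : (pvCore repl count n ((s.drop (j.toNat + 1)).splitOn '\n')).1 ≠ [] := by
        intro he
        have := pvCore_length repl count n ((s.drop (j.toNat + 1)).splitOn '\n')
        rw [he] at this
        exact splitOn_ne_nil _ (List.length_eq_zero_iff.mp this.symm)
      rw [pvChunks_cons _ _ hne]
      simp
termination_by s.length + 1 - i
decreasing_by omega

-- the whitespace flag B maintains, as a function of the buffer
def pvAllWs (buf : List Char) : Bool := buf.all (fun c => c == ' ' || c == '\t')

theorem pvAllWs_iff (buf : List Char) :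
    pvAllWs buf = true ↔ ∀ c ∈ buf, c = ' ' ∨ c = '\t' := by
  simp [pvAllWs, List.all_eq_true]

-- B's char-stream fold plus final flush computes pvCore on the split of buf ++ s
theorem runB_eq (repl : List Char) (count : Int) (s : List Char) :
    ∀ (out : List (List Char)) (buf : List Char) (n : Int), '\n' ∉ buf →
    (match s.foldl (stepB repl count) (out, buf, pvAllWs buf, n) with
     | (out, buf, ws, n) =>
       if buf ≠ [] ∧ ws = true ∧ (count = 0 ∨ n < count) then (out ++ [repl], n + 1)
       else (out ++ [buf], n))
    = (out ++ pvChunks (pvCore repl count n ((buf ++ s).splitOn '\n')).1,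
       (pvCore repl count n ((buf ++ s).splitOn '\n')).2) := by
  induction s with
  | nil =>
    intro out buf n hb
    simp only [List.foldl_nil, List.append_nil]
    rw [splitOn_no_newline _ hb]
    simp only [pvCore]
    by_cases hc : buf ≠ [] ∧ (∀ c ∈ buf, c = ' ' ∨ c = '\t') ∧ (count = 0 ∨ n < count)
    · rw [if_pos hc, if_pos ⟨hc.1, (pvAllWs_iff buf).2 hc.2.1, hc.2.2⟩]
      rfl
    · rw [if_neg hc, if_neg (by
        intro ⟨h1, h2, h3⟩; exact hc ⟨h1, (pvAllWs_iff buf).1 h2, h3⟩)]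
      rfl
  | cons c cs ih =>
    intro out buf n hb
    by_cases hc : c = '\n'
    · subst hc
      have hsplit : (buf ++ '\n' :: cs).splitOn '\n' = buf :: cs.splitOn '\n' :=
        splitOn_pre _ _ hb
      by_cases hcc : buf ≠ [] ∧ (∀ c ∈ buf, c = ' ' ∨ c = '\t') ∧ (count = 0 ∨ n < count)
      · have hccB : buf ≠ [] ∧ pvAllWs buf = true ∧ (count = 0 ∨ n < count) :=
          ⟨hcc.1, (pvAllWs_iff buf).2 hcc.2.1, hcc.2.2⟩
        have hstep : stepB repl count (out, buf, pvAllWs buf, n) '\n'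
            = (out ++ [repl] ++ [['\n']], ([] : List Char), true, n + 1) := by
          simp only [stepB]
          rw [if_pos trivial, if_pos hccB]
        rw [List.foldl_cons, hstep, hsplit]
        simp only [pvCore]
        rw [if_pos hcc]
        have hih := ih (out ++ [repl] ++ [['\n']]) [] (n + 1) (by simp)
        simp only [pvAllWs, List.all_nil, List.nil_append] at hih
        rw [hih]
        have hne : (pvCore repl count (n + 1) (cs.splitOn '\n')).1 ≠ [] := by
          intro he
          have := pvCore_length repl count (n + 1) (cs.splitOn '\n')
          rw [he] at this
          exact splitOn_ne_nil _ (List.length_eq_zero_iff.mp this.symm)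
        rw [pvChunks_cons _ _ hne]
        simp
      · have hccB : ¬(buf ≠ [] ∧ pvAllWs buf = true ∧ (count = 0 ∨ n < count)) := by
          intro ⟨h1, h2, h3⟩; exact hcc ⟨h1, (pvAllWs_iff buf).1 h2, h3⟩
        have hstep : stepB repl count (out, buf, pvAllWs buf, n) '\n'
            = (out ++ [buf] ++ [['\n']], ([] : List Char), true, n) := by
          simp only [stepB]
          rw [if_pos trivial, if_neg hccB]
        rw [List.foldl_cons, hstep, hsplit]
        simp only [pvCore]
        rw [if_neg hcc]
        have hih := ih (out ++ [buf] ++ [['\n']]) [] n (by simp)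
        simp only [pvAllWs, List.all_nil, List.nil_append] at hih
        rw [hih]
        have hne : (pvCore repl count n (cs.splitOn '\n')).1 ≠ [] := by
          intro he
          have := pvCore_length repl count n (cs.splitOn '\n')
          rw [he] at this
          exact splitOn_ne_nil _ (List.length_eq_zero_iff.mp this.symm)
        rw [pvChunks_cons _ _ hne]
        simp
    · have hstep : stepB repl count (out, buf, pvAllWs buf, n) c
          = (out, buf ++ [c], pvAllWs (buf ++ [c]), n) := by
        simp only [stepB, if_neg hc]
        simp [pvAllWs, List.all_append]
      have hbc : '\n' ∉ buf ++ [c] := by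
        simp only [List.mem_append, List.mem_singleton]
        rintro (h | h)
        · exact hb h
        · exact hc h.symm
      rw [List.foldl_cons, hstep,
          show buf ++ c :: cs = (buf ++ [c]) ++ cs by simp]
      exact ih out (buf ++ [c]) n hbc

-- ===== VERDICT (by name: the statement is the Claim_ definition above) =====
theorem subn_whitespace_only_lines_py_spec : Claim_equal_subn_whitespace_only_lines_py := by
  intro repl string count _
  show _ = _
  unfold subn_whitespace_only_lines_py subn_whitespace_only_lines_py_alt
  rw [loopA_eq repl.toList count string.toList 0 [] 0 (by simp)]
  have h := runB_eq repl.toList count string.toList [] [] 0 (by simp)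
  simp only [pvAllWs, List.all_nil, List.nil_append] at h
  rcases hst : string.toList.foldl (stepB repl.toList count) ([], [], true, 0) with ⟨o, b, w, m⟩
  rw [hst] at h
  dsimp only at h
  simp only [List.drop_zero, List.nil_append]
  split
  · next hcond =>
      rw [if_pos hcond] at h
      rw [Prod.mk.injEq] at h
      simp [h.1, h.2]
  · next hcond =>
      rw [if_neg hcond] at h
      rw [Prod.mk.injEq] at h
      simp [h.1, h.2]
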